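-- pv_equiv track=rewrite | github.com/simasaadi/python-elt-quality-pipeline | tools/make_readme_viz.py | _pick_date_key
-- ===== SOURCE A (Python) =====
-- from typing import Dict, List, Optional, Tuple
--
-- def _pick_date_key(fact_cols: List[str]) -> Optional[str]:
--     lc = [c.lower() for c in fact_cols]
--     for preferred in ["date_sk", "order_date_sk", "sale_date_sk", "txn_date_sk", "transaction_date_sk"]:
--         if preferred in lc:
--             return fact_cols[lc.index(preferred)]
--     for i, c in enumerate(lc):
--         if c.endswith("_date_sk"):
--             return fact_cols[i]
--     for i, c in enumerate(lc):
--         if "date" in c and c.endswith("_sk"):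
--             return fact_cols[i]
--     return None
-- ===== SOURCE B (Python) =====
-- from typing import List, Optional
--
-- _PREFS = ["date_sk", "order_date_sk", "sale_date_sk", "txn_date_sk", "transaction_date_sk"]
--
--
-- def _score(l: str) -> Optional[int]:
--     # priority score: preferred names rank by their position in _PREFS,
--     # then the "_date_sk" suffix tier, then the "date"+"_sk" tier.
--     if l in _PREFS:
--         return _PREFS.index(l)
--     if l.endswith("_date_sk"):
--         return len(_PREFS)
--     if "date" in l and l.endswith("_sk"):
--         return len(_PREFS) + 1
--     return None
--
--
-- def _pick_date_key(fact_cols: List[str]) -> Optional[str]: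
--     best = None  # (score, column); single scored pass, first column wins ties
--     for c in fact_cols:
--         s = _score(c.lower())
--         if s is not None and (best is None or s < best[0]):
--             best = (s, c)
--     return best[1] if best is not None else None
-- ===== Notes on version B (the rewrite author's own statement) =====
-- stated objective: alternative
-- what changed: Replaced A's three sequential scans (a preference-list membership pass with list.index, then two suffix scans) by a single scored pass that assigns each column a numeric priority (preference index, 5 for '_date_sk', 6 for 'date'+'_sk') and keeps the first minimum.
import Mathlib
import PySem

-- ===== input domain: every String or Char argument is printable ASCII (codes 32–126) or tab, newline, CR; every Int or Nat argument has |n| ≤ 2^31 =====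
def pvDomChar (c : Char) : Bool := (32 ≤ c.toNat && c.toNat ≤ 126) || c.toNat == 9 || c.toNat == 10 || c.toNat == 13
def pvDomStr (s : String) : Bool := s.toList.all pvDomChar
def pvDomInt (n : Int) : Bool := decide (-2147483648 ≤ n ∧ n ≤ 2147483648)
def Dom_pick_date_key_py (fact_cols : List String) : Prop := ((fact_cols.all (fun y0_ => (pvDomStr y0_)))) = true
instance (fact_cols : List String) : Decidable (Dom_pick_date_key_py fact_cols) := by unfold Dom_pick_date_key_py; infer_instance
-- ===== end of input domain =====

-- B replaces A's three sequential scans by one scored selection pass (alternative decomposition, same cost).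

def pvPrefs : List String := ["date_sk", "order_date_sk", "sale_date_sk", "txn_date_sk", "transaction_date_sk"]

-- ===== PORT A =====
-- 'for preferred in [...]: if preferred in lc: return fact_cols[lc.index(preferred)]'
def findPrefA (fact_cols lc : List String) : List String → Option String
  | [] => none
  | p :: ps =>
    if lc.contains p then
      (PySem.List.index? lc p).bind (fun i => PySem.List.pyGet? fact_cols (i : Int))
    else findPrefA fact_cols lc ps

-- 'for i, c in enumerate(lc): if c.endswith("_date_sk"): return fact_cols[i]' over zip fact_cols lc
def findTier1A : List (String × String) → Option String
  | [] => none
  | (c0, c) :: rest => if PySem.Str.endswith c "_date_sk" then some c0 else findTier1A rest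

-- 'for i, c in enumerate(lc): if "date" in c and c.endswith("_sk"): return fact_cols[i]'
def findTier2A : List (String × String) → Option String
  | [] => none
  | (c0, c) :: rest =>
    if PySem.Str.isIn "date" c && PySem.Str.endswith c "_sk" then some c0 else findTier2A rest

def pick_date_key_py (fact_cols : List String) : Option String :=
  let lc := fact_cols.map PySem.Str.lower
  match findPrefA fact_cols lc pvPrefs with
  | some r => some r
  | none =>
    match findTier1A (fact_cols.zip lc) with
    | some r => some r
    | none => findTier2A (fact_cols.zip lc)

-- ===== PORT B =====
def pvScore (l : String) : Option Nat :=
  if pvPrefs.contains l then PySem.List.index? pvPrefs l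
  else if PySem.Str.endswith l "_date_sk" then some pvPrefs.length
  else if PySem.Str.isIn "date" l && PySem.Str.endswith l "_sk" then some (pvPrefs.length + 1)
  else none

def pvStep (best : Option (Nat × String)) (c : String) : Option (Nat × String) :=
  match pvScore (PySem.Str.lower c) with
  | none => best
  | some s =>
    match best with
    | none => some (s, c)
    | some (bs, bc) => if s < bs then some (s, c) else some (bs, bc)

def pick_date_key_py_alt (fact_cols : List String) : Option String :=
  (fact_cols.foldl pvStep none).map Prod.snd

-- ===== PRECONDITION & SPEC =====
def Spec_pick_date_key_py (fact_cols : List String) (out : Option String) : Prop := out = pick_date_key_py_alt fact_cols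
instance (fact_cols : List String) (out : Option String) : Decidable (Spec_pick_date_key_py fact_cols out) := by unfold Spec_pick_date_key_py; infer_instance

-- ===== CLAIM (what is proved, stated in full; the proofs are below) =====
def Claim_equal_pick_date_key_py : Prop := ∀ (fact_cols : List String), Dom_pick_date_key_py fact_cols → Spec_pick_date_key_py fact_cols (pick_date_key_py fact_cols)

-- ===== LEMMAS AND PROOFS =====

-- keep the smaller-scored (earlier on ties) of two optional candidates
def pvMerge (a b : Option (Nat × String)) : Option (Nat × String) :=
  match a, b with
  | none, b => b
  | a, none => a
  | some (s, c), some (s', c') => if s' < s then some (s', c') else some (s, c)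

-- front-to-back minimum selection under a score function
def pvM (f : String → Option Nat) : List String → Option (Nat × String)
  | [] => none
  | c :: cs => pvMerge ((f c).map (fun s => (s, c))) (pvM f cs)

theorem pvMerge_none_right (a : Option (Nat × String)) : pvMerge a none = a := by
  cases a with
  | none => rfl
  | some p => cases p; rfl

theorem pvMerge_assoc (a b c : Option (Nat × String)) :
    pvMerge (pvMerge a b) c = pvMerge a (pvMerge b c) := by
  cases a with
  | none => rfl
  | some p =>
    cases b with
    | none => rfl
    | some q =>
      cases p with | mk s1 c1 =>
      cases q with | mk s2 c2 =>
      cases c with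
      | none => simp only [pvMerge]; split_ifs <;> rfl
      | some r =>
        cases r with | mk s3 c3 =>
        simp only [pvMerge]
        split_ifs <;> simp only [pvMerge] <;> split_ifs <;> first | rfl | omega

theorem pvStep_eq_merge (b : Option (Nat × String)) (c : String) :
    pvStep b c = pvMerge b ((pvScore (PySem.Str.lower c)).map (fun s => (s, c))) := by
  cases h : pvScore (PySem.Str.lower c) with
  | none => cases b with
    | none => simp [pvStep, pvMerge, h]
    | some p => cases p; simp [pvStep, pvMerge, h]
  | some s => cases b with
    | none => simp [pvStep, pvMerge, h]
    | some p => cases p; simp [pvStep, pvMerge, h]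

theorem foldl_pvStep (cols : List String) : ∀ (b : Option (Nat × String)),
    cols.foldl pvStep b = pvMerge b (pvM (fun c => pvScore (PySem.Str.lower c)) cols) := by
  induction cols with
  | nil => intro b; simp [pvM, pvMerge_none_right]
  | cons c cs ih =>
    intro b
    simp only [List.foldl_cons, pvM]
    rw [ih, pvStep_eq_merge, pvMerge_assoc]

theorem pvM_congr {f g : String → Option Nat} : ∀ {cols : List String},
    (∀ c ∈ cols, f c = g c) → pvM f cols = pvM g cols := by
  intro cols
  induction cols with
  | nil => intro _; rfl
  | cons c cs ih =>
    intro h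
    simp only [pvM, h c (List.mem_cons_self), ih (fun x hx => h x (List.mem_cons_of_mem _ hx))]

theorem find?_congr {p q : String → Bool} : ∀ {cols : List String},
    (∀ c ∈ cols, p c = q c) → cols.find? p = cols.find? q := by
  intro cols
  induction cols with
  | nil => intro _; rfl
  | cons c cs ih =>
    intro h
    simp only [List.find?_cons, h c (List.mem_cons_self), ih (fun x hx => h x (List.mem_cons_of_mem _ hx))]

theorem pvM_mem {f : String → Option Nat} : ∀ {cols : List String} {s : Nat} {x : String},
    pvM f cols = some (s, x) → x ∈ cols ∧ f x = some s := by
  intro cols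
  induction cols with
  | nil => intro s x h; simp [pvM] at h
  | cons c cs ih =>
    intro s x h
    simp only [pvM] at h
    cases hc : f c with
    | none =>
      simp only [hc, Option.map_none, pvMerge] at h
      rcases ih h with ⟨hm, hf⟩
      exact ⟨List.mem_cons_of_mem _ hm, hf⟩
    | some sc =>
      simp only [hc, Option.map_some, pvMerge] at h
      cases hM : pvM f cs with
      | none =>
        rw [hM] at h
        simp only at h
        cases h; exact ⟨List.mem_cons_self, hc⟩
      | some q =>
        cases q with | mk s' x' =>
        rw [hM] at h
        simp only at h
        split_ifs at h
        · cases h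
          rcases ih hM with ⟨hm, hf⟩
          exact ⟨List.mem_cons_of_mem _ hm, hf⟩
        · cases h; exact ⟨List.mem_cons_self, hc⟩

-- pvM picks the first element achieving the minimum score m
theorem pvM_min {f : String → Option Nat} {m : Nat} : ∀ {cols : List String},
    (∃ c ∈ cols, f c = some m) → (∀ c ∈ cols, ∀ s, f c = some s → m ≤ s) →
    pvM f cols = (cols.find? (fun c => f c == some m)).map (fun c => (m, c)) := by
  intro cols
  induction cols with
  | nil => intro h _; simp at h
  | cons c cs ih =>
    intro hex hlb
    cases hc : f c with
    | some sc =>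
      by_cases hm : sc = m
      · subst hm
        rw [List.find?_cons_of_pos (by simp [hc])]
        simp only [pvM, hc, Option.map_some]
        cases hM : pvM f cs with
        | none => simp [pvMerge]
        | some q =>
          cases q with | mk s' x' =>
          rcases pvM_mem hM with ⟨hm', hf'⟩
          have : sc ≤ s' := hlb x' (List.mem_cons_of_mem _ hm') s' hf'
          simp [pvMerge, Nat.not_lt.mpr this]
      · have hex' : ∃ x ∈ cs, f x = some m := by
          rcases hex with ⟨x, hx, hfx⟩
          rcases List.mem_cons.mp hx with h1 | h1
          · subst h1; rw [hc] at hfx; cases hfx; exact absurd rfl hm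
          · exact ⟨x, h1, hfx⟩
        have hM := ih hex' (fun x hx => hlb x (List.mem_cons_of_mem _ hx))
        rcases hex' with ⟨x, hx, hfx⟩
        have hfind : cs.find? (fun c => f c == some m) ≠ none := by
          intro hn
          have := List.find?_eq_none.mp hn x hx
          simp [hfx] at this
        cases hF : cs.find? (fun c => f c == some m) with
        | none => exact absurd hF hfind
        | some y =>
          have hmlt : m < sc := lt_of_le_of_ne (hlb c List.mem_cons_self sc hc) (fun h => hm h.symm)
          rw [List.find?_cons_of_neg (by simp [hc, hm])]
          rw [hF] at hM
          simp only [pvM, hc, hM, hF, Option.map_some, pvMerge, if_pos hmlt]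
    | none =>
      have hex' : ∃ x ∈ cs, f x = some m := by
        rcases hex with ⟨x, hx, hfx⟩
        rcases List.mem_cons.mp hx with h1 | h1
        · subst h1; rw [hc] at hfx; cases hfx
        · exact ⟨x, h1, hfx⟩
      have hM := ih hex' (fun x hx => hlb x (List.mem_cons_of_mem _ hx))
      rw [List.find?_cons_of_neg (by simp [hc])]
      simp only [pvM, hc, Option.map_none, pvMerge, hM]

-- two-level selection: when all scores are a or b with a < b, pvM is "first a, else first b"
theorem pvM_two {f : String → Option Nat} {a b : Nat} (hab : a < b) : ∀ {cols : List String},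
    (∀ c ∈ cols, f c = none ∨ f c = some a ∨ f c = some b) →
    (pvM f cols).map Prod.snd =
      (cols.find? (fun c => f c == some a)).orElse (fun _ => cols.find? (fun c => f c == some b)) := by
  intro cols
  induction cols with
  | nil => intro _; simp [pvM]
  | cons c cs ih =>
    intro h
    have hcs : ∀ x ∈ cs, f x = none ∨ f x = some a ∨ f x = some b :=
      fun x hx => h x (List.mem_cons_of_mem _ hx)
    have hlb : ∀ x ∈ cs, ∀ s, f x = some s → a ≤ s := by
      intro x hx s hs
      rcases hcs x hx with h1 | h1 | h1 <;> rw [h1] at hs <;> cases hs <;> omega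
    rcases h c List.mem_cons_self with hc | hc | hc
    · rw [List.find?_cons_of_neg (by simp [hc]), List.find?_cons_of_neg (by simp [hc])]
      simp only [pvM, hc, Option.map_none, pvMerge]
      exact ih hcs
    · -- head scores a: it wins
      rw [List.find?_cons_of_pos (by simp [hc])]
      simp only [pvM, hc, Option.map_some]
      cases hM : pvM f cs with
      | none => simp [pvMerge, Option.orElse]
      | some q =>
        cases q with | mk s' x' =>
        rcases pvM_mem hM with ⟨hm', hf'⟩
        have : a ≤ s' := hlb x' hm' s' hf'
        simp [pvMerge, Nat.not_lt.mpr this, Option.orElse]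
    · -- head scores b
      rw [List.find?_cons_of_neg (by simp [hc]; omega)]
      simp only [pvM, hc, Option.map_some]
      cases hF : cs.find? (fun c => f c == some a) with
      | some y =>
        have hy := List.find?_some hF
        have hmem := List.mem_of_find?_eq_some hF
        have hfy : f y = some a := by simpa using hy
        have hM := pvM_min (f := f) (m := a) ⟨y, hmem, hfy⟩ hlb
        rw [hF] at hM
        simp only [hM, Option.map_some, pvMerge, if_pos hab]
        simp [Option.orElse]
      | none =>
        have hnoa : ∀ x ∈ cs, f x ≠ some a := by
          intro x hx hfx
          have := List.find?_eq_none.mp hF x hx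
          simp [hfx] at this
        rw [List.find?_cons_of_pos (by simp [hc])]
        cases hM : pvM f cs with
        | none => simp [pvMerge, hF, Option.orElse]
        | some q =>
          cases q with | mk s' x' =>
          rcases pvM_mem hM with ⟨hm', hf'⟩
          have hs' : s' = b := by
            rcases hcs x' hm' with h1 | h1 | h1
            · rw [h1] at hf'; cases hf'
            · exact absurd h1 (hnoa x' hm')
            · rw [h1] at hf'; cases hf'; rfl
          subst hs'
          simp [pvMerge, Option.orElse]

-- fact_cols[lc.index(p)] is the first column whose lowercase equals p
theorem findEq_eq : ∀ (cols : List String) (p : String),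
    (cols.map PySem.Str.lower).contains p = true →
    (PySem.List.index? (cols.map PySem.Str.lower) p).bind
        (fun i => PySem.List.pyGet? cols (i : Int)) =
      cols.find? (fun c => PySem.Str.lower c == p) := by
  intro cols
  induction cols with
  | nil => intro p h; simp at h
  | cons c cs ih =>
    intro p h
    by_cases hc : PySem.Str.lower c = p
    · subst hc
      rw [List.map_cons, PySem.List.index?_cons_self, List.find?_cons_of_pos (by simp)]
      simpa using PySem.List.pyGet?_zero_cons c cs
    · have h' : (cs.map PySem.Str.lower).contains p = true := by
        simp only [List.map_cons, List.contains_cons] at h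
        rcases Bool.or_eq_true_iff.mp h with h1 | h1
        · have h1' : p = PySem.Str.lower c := by simpa using h1
          exact absurd h1'.symm hc
        · exact h1
      have hmem : p ∈ cs.map PySem.Str.lower := by simpa using h'
      have hsome := (PySem.List.index?_isSome_iff (cs.map PySem.Str.lower) p).mpr hmem
      cases hI : PySem.List.index? (cs.map PySem.Str.lower) p with
      | none => rw [hI] at hsome; simp at hsome
      | some i =>
        rw [List.map_cons, List.find?_cons_of_neg (by simp [hc]),
          PySem.List.index?_cons_of_ne _ hc, hI]
        simp only [Option.map_some, Option.bind_some]
        have hcast : ((i + 1 : Nat) : Int) = (i : Int) + 1 := by push_cast; ring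
        rw [hcast, PySem.List.pyGet?_cons_succ]
        rw [← ih p h', hI]
        rfl

-- the master preference lemma: peeling the preference list
theorem pvM_prefs : ∀ (ps : List String) (k : Nat) (g : String → Option Nat)
    (cols : List String),
    (∀ c s, g c = some s → k + ps.length ≤ s) →
    (pvM (fun c => match PySem.List.index? ps (PySem.Str.lower c) with
                   | some j => some (k + j)
                   | none => g c) cols).map Prod.snd =
      (findPrefA cols (cols.map PySem.Str.lower) ps).orElse
        (fun _ => (pvM g cols).map Prod.snd) := by
  intro ps
  induction ps with
  | nil =>
    intro k g cols hg
    simp only [findPrefA]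
    have : pvM (fun c => match PySem.List.index? ([] : List String) (PySem.Str.lower c) with
        | some j => some (k + j) | none => g c) cols = pvM g cols := by
      apply pvM_congr; intro c _
      have h0 : PySem.List.index? ([] : List String) (PySem.Str.lower c) = none :=
        (PySem.List.index?_eq_none_iff _ _).mpr (by simp)
      simp [h0]
    rw [this]; rfl
  | cons p ps' ih =>
    intro k g cols hg
    set F := fun c => match PySem.List.index? (p :: ps') (PySem.Str.lower c) with
      | some j => some (k + j) | none => g c with hF
    by_cases hp : (cols.map PySem.Str.lower).contains p = true
    · -- some column lowercases to p: tier k wins, first such column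
      have hmem : p ∈ cols.map PySem.Str.lower := by simpa using hp
      rcases List.mem_map.mp hmem with ⟨c0, hc0, hlc0⟩
      have hFc0 : F c0 = some k := by
        have h0 : PySem.List.index? (p :: ps') (PySem.Str.lower c0) = some 0 := by
          rw [hlc0]; exact PySem.List.index?_cons_self p ps'
        simp only [hF]
        rw [h0]
        simp
      have hlb : ∀ c ∈ cols, ∀ s, F c = some s → k ≤ s := by
        intro c _ s hs
        simp only [hF] at hs
        cases hI : PySem.List.index? (p :: ps') (PySem.Str.lower c) with
        | some j => rw [hI] at hs; cases hs; omega
        | none =>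
          rw [hI] at hs
          have := hg c s hs
          simp only [List.length_cons] at this
          omega
      have hmin := pvM_min (f := F) (m := k) ⟨c0, hc0, hFc0⟩ hlb
      have hpred : ∀ c ∈ cols, (F c == some k) = (PySem.Str.lower c == p) := by
        intro c _
        by_cases hcp : PySem.Str.lower c = p
        · have h0 : PySem.List.index? (p :: ps') (PySem.Str.lower c) = some 0 := by
            rw [hcp]; exact PySem.List.index?_cons_self p ps'
          simp only [hF]
          rw [h0]
          simp [hcp]
        · simp only [hF]
          cases hI : PySem.List.index? (p :: ps') (PySem.Str.lower c) with
          | some j =>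
            rw [PySem.List.index?_cons_of_ne _ (fun h => hcp h.symm)] at hI
            cases hJ : PySem.List.index? ps' (PySem.Str.lower c) with
            | none => rw [hJ] at hI; simp at hI
            | some j' =>
              rw [hJ] at hI
              simp only [Option.map_some] at hI
              cases hI
              have hne : k + (j' + 1) ≠ k := by omega
              simp [hcp, hne]
          | none =>
            cases hgc : g c with
            | none => simp [hcp]
            | some s =>
              have := hg c s hgc
              simp only [List.length_cons] at this
              have hne : s ≠ k := by omega
              simp [hcp, hgc, hne]
      rw [hmin, find?_congr hpred]
      simp only [findPrefA, hp, if_pos]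
      rw [findEq_eq cols p hp]
      cases hFind : cols.find? (fun c => PySem.Str.lower c == p) with
      | none =>
        exfalso
        have := List.find?_eq_none.mp hFind c0 hc0
        simp [hlc0] at this
      | some y => simp [Option.orElse]
    · -- p absent: F coincides with the (ps', k+1) score function
      have hnp : ∀ c ∈ cols, PySem.Str.lower c ≠ p := by
        intro c hc hcp
        exact hp (by simp; exact ⟨c, hc, hcp⟩)
      have hcongr : ∀ c ∈ cols, F c =
          (fun c => match PySem.List.index? ps' (PySem.Str.lower c) with
           | some j => some ((k + 1) + j) | none => g c) c := by
        intro c hc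
        simp only [hF]
        rw [PySem.List.index?_cons_of_ne _ (fun h => (hnp c hc) h.symm)]
        cases hJ : PySem.List.index? ps' (PySem.Str.lower c) with
        | none => simp
        | some j =>
          simp only [Option.map_some]
          show some (k + (j + 1)) = some (k + 1 + j)
          congr 1
          omega
      rw [pvM_congr hcongr]
      rw [ih (k + 1) g cols (fun c s hs => by
        have := hg c s hs
        simp only [List.length_cons] at this
        omega)]
      simp only [findPrefA, hp, Bool.false_eq_true, not_false_eq_true, if_neg]

theorem findTier1A_eq : ∀ (cols : List String),
    findTier1A (cols.zip (cols.map PySem.Str.lower)) =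
      cols.find? (fun c => PySem.Str.endswith (PySem.Str.lower c) "_date_sk") := by
  intro cols
  induction cols with
  | nil => rfl
  | cons c cs ih =>
    rw [List.map_cons, List.zip_cons_cons]
    show (if PySem.Str.endswith (PySem.Str.lower c) "_date_sk" then some c
          else findTier1A (cs.zip (cs.map PySem.Str.lower))) = _
    by_cases h : PySem.Str.endswith (PySem.Str.lower c) "_date_sk" = true
    · rw [if_pos h, List.find?_cons_of_pos
        (p := fun c => PySem.Str.endswith (PySem.Str.lower c) "_date_sk") h]
    · rw [if_neg h, List.find?_cons_of_neg
        (p := fun c => PySem.Str.endswith (PySem.Str.lower c) "_date_sk") h, ih]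

theorem findTier2A_eq : ∀ (cols : List String),
    findTier2A (cols.zip (cols.map PySem.Str.lower)) =
      cols.find? (fun c => PySem.Str.isIn "date" (PySem.Str.lower c) &&
        PySem.Str.endswith (PySem.Str.lower c) "_sk") := by
  intro cols
  induction cols with
  | nil => rfl
  | cons c cs ih =>
    rw [List.map_cons, List.zip_cons_cons]
    show (if PySem.Str.isIn "date" (PySem.Str.lower c) && PySem.Str.endswith (PySem.Str.lower c) "_sk"
            then some c
          else findTier2A (cs.zip (cs.map PySem.Str.lower))) = _
    by_cases h : (PySem.Str.isIn "date" (PySem.Str.lower c) &&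
        PySem.Str.endswith (PySem.Str.lower c) "_sk") = true
    · rw [if_pos h, List.find?_cons_of_pos (p := fun c =>
        PySem.Str.isIn "date" (PySem.Str.lower c) && PySem.Str.endswith (PySem.Str.lower c) "_sk") h]
    · rw [if_neg h, List.find?_cons_of_neg (p := fun c =>
        PySem.Str.isIn "date" (PySem.Str.lower c) && PySem.Str.endswith (PySem.Str.lower c) "_sk") h, ih]

-- the fallback score function (tiers 5 and 6)
def pvG (c : String) : Option Nat :=
  if PySem.Str.endswith (PySem.Str.lower c) "_date_sk" then some 5
  else if PySem.Str.isIn "date" (PySem.Str.lower c) && PySem.Str.endswith (PySem.Str.lower c) "_sk"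
    then some 6
  else none

theorem pvScore_eq (c : String) :
    pvScore (PySem.Str.lower c) =
      match PySem.List.index? pvPrefs (PySem.Str.lower c) with
      | some j => some (0 + j)
      | none => pvG c := by
  unfold pvScore pvG
  by_cases h : pvPrefs.contains (PySem.Str.lower c) = true
  · rw [if_pos h]
    have hmem : PySem.Str.lower c ∈ pvPrefs := by simpa using h
    have hsome := (PySem.List.index?_isSome_iff pvPrefs (PySem.Str.lower c)).mpr hmem
    cases hI : PySem.List.index? pvPrefs (PySem.Str.lower c) with
    | none => rw [hI] at hsome; simp at hsome
    | some j => simp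
  · rw [if_neg h]
    rw [(PySem.List.index?_eq_none_iff pvPrefs (PySem.Str.lower c)).mpr (by simpa using h)]
    simp [pvPrefs]

theorem pvG_bounds (c : String) (s : Nat) (h : pvG c = some s) : 0 + pvPrefs.length ≤ s := by
  simp only [pvG] at h
  split_ifs at h <;> cases h <;> simp [pvPrefs]

theorem pvG_cases (c : String) : pvG c = none ∨ pvG c = some 5 ∨ pvG c = some 6 := by
  simp only [pvG]; split_ifs <;> simp

-- ===== VERDICT (by name: the statement is the Claim_ definition above) =====
theorem pick_date_key_py_spec : Claim_equal_pick_date_key_py := by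
  intro cols _
  unfold Spec_pick_date_key_py
  unfold pick_date_key_py pick_date_key_py_alt
  rw [foldl_pvStep]
  simp only [pvMerge]
  rw [pvM_congr (fun c _ => pvScore_eq c)]
  rw [pvM_prefs pvPrefs 0 pvG cols (fun c s hs => pvG_bounds c s hs)]
  rw [pvM_two (by omega : (5:Nat) < 6) (fun c _ => pvG_cases c)]
  cases hP : findPrefA cols (cols.map PySem.Str.lower) pvPrefs with
  | some r => simp [Option.orElse]
  | none =>
    simp only [Option.orElse]
    have h5 : ∀ c ∈ cols, (pvG c == some 5) =
        PySem.Str.endswith (PySem.Str.lower c) "_date_sk" := by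
      intro c _
      simp only [pvG]
      split_ifs with h1 h2 <;> simp_all
    rw [find?_congr h5, ← findTier1A_eq]
    cases hT1 : findTier1A (cols.zip (cols.map PySem.Str.lower)) with
    | some r => simp
    | none =>
      simp only [Option.orElse]
      have hno1 : ∀ c ∈ cols, PySem.Str.endswith (PySem.Str.lower c) "_date_sk" = false := by
        intro c hc
        rw [findTier1A_eq] at hT1
        have := List.find?_eq_none.mp hT1 c hc
        simpa using this
      have h6 : ∀ c ∈ cols, (pvG c == some 6) =
          (PySem.Str.isIn "date" (PySem.Str.lower c) &&
            PySem.Str.endswith (PySem.Str.lower c) "_sk") := by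
        intro c hc
        simp only [pvG, hno1 c hc]
        split_ifs with h2 <;> simp_all
      rw [find?_congr h6, ← findTier2A_eq]
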